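-- pv_equiv track=rewrite | github.com/lidongze0629/Miscellaneous | machineLearning/foundation/bayes/bayes.py | doc2Vec
-- ===== SOURCE A (Python) =====
-- def doc2Vec(doc, vocabList):
--     vec = [0] * len(vocabList)
--     for word in doc:
--         if word in vocabList:
--             vec[vocabList.index(word)] = 1
--         else:
--             print ("the word: %s is not in my vocabulary!" % word)
--     return vec
-- ===== SOURCE B (Python) =====
-- def doc2Vec(doc, vocabList):
--     present = set(doc)
--     vocabSet = set(vocabList)
--     vec = [1 if w in present else 0 for w in vocabList]
--     for word in doc:
--         if word not in vocabSet:
--             print("the word: %s is not in my vocabulary!" % word)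
--     return vec
-- ===== Notes on version B (the rewrite author's own statement) =====
-- stated objective: alternative
-- what changed: B builds the vector in one pass over vocabList with a precomputed set of document words, instead of A's pass over doc with a repeated linear vocabList.index scan; Pre_ excludes inputs where a document word occurs more than once in vocabList, since there A's .index marks only the first copy of the duplicated vocab word while B naturally marks every copy.
-- outside the precondition, e.g. on doc2Vec(['a'], ['a', 'a']): A returns [1, 0], B returns [1, 1]
import Mathlib
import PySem

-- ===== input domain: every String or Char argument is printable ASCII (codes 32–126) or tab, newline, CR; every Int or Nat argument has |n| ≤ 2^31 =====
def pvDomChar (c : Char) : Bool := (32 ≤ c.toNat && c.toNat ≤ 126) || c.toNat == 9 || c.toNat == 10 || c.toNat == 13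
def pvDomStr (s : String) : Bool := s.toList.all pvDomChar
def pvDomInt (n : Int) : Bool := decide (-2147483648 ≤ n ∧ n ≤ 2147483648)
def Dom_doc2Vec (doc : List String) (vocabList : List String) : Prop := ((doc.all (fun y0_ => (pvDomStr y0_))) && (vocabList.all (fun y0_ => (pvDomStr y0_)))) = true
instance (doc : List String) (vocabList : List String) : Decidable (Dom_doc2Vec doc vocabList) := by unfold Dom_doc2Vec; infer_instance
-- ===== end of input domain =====

-- B builds the presence vector in one pass over vocabList using a set of the document's words,
-- instead of A's doc-driven pass with repeated linear vocabList.index scans; return values are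
-- proved equal whenever no document word is duplicated in vocabList (Pre_). (Both Pythons print
-- the same warnings for out-of-vocabulary words; only the return value is claimed.)

-- ===== PORT A =====
def doc2Vec (doc : List String) (vocabList : List String) : List Int :=
  doc.foldl (fun vec word =>
    if word ∈ vocabList then
      match PySem.List.index? vocabList word with
      | some i => vec.set i 1
      | none => vec
    else vec) (List.replicate vocabList.length 0)

-- ===== PORT B =====
-- Source B's warning pass only prints; it does not affect the returned value and is not ported
def doc2Vec_alt (doc : List String) (vocabList : List String) : List Int :=
  let present := PySem.Set.ofList doc
  vocabList.map (fun w => if present.contains w then (1 : Int) else 0)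

-- ===== PRECONDITION & SPEC =====
-- Pre_ excludes inputs where some document word occurs more than once in vocabList (A still
-- returns there): on such duplicate vocab entries A's .index marks only the first copy of the
-- word while B naturally marks every copy — a defensible-corner difference on degenerate
-- vocabularies.
def Pre_doc2Vec (doc : List String) (vocabList : List String) : Prop :=
  ∀ w ∈ doc, vocabList.count w ≤ 1
instance (doc : List String) (vocabList : List String) : Decidable (Pre_doc2Vec doc vocabList) := by unfold Pre_doc2Vec; infer_instance
def pvWitness_doc2Vec : List String × List String := (["a", "c", "a"], ["a", "b"])

def Spec_doc2Vec (doc : List String) (vocabList : List String) (out : List Int) : Prop := out = doc2Vec_alt doc vocabList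
instance (doc : List String) (vocabList : List String) (out : List Int) : Decidable (Spec_doc2Vec doc vocabList out) := by unfold Spec_doc2Vec; infer_instance

-- ===== CLAIM (what is proved, stated in full; the proofs are below) =====
def Claim_equal_doc2Vec : Prop := ∀ (doc : List String) (vocabList : List String), Dom_doc2Vec doc vocabList → Pre_doc2Vec doc vocabList → Spec_doc2Vec doc vocabList (doc2Vec doc vocabList)

-- ===== LEMMAS AND PROOFS =====

theorem pvA_length (vocabList : List String) (doc : List String) :
    (doc2Vec doc vocabList).length = vocabList.length := by
  unfold doc2Vec
  suffices h : ∀ (vec : List Int), vec.length = vocabList.length →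
      (doc.foldl (fun vec word =>
        if word ∈ vocabList then
          match PySem.List.index? vocabList word with
          | some i => vec.set i 1
          | none => vec
        else vec) vec).length = vocabList.length by
    exact h _ (by simp)
  induction doc with
  | nil => intro vec h; simpa using h
  | cons d ds ih =>
    intro vec h
    simp only [List.foldl_cons]
    apply ih
    split
    · cases hidx : PySem.List.index? vocabList d <;> simp [h]
    · exact h

theorem pvA_get (vocabList : List String) (doc : List String) :
    ∀ (j : Nat), j < vocabList.length →
      (doc2Vec doc vocabList).getD j 0 =
        if vocabList.getD j "" ∈ doc ∧ PySem.List.index? vocabList (vocabList.getD j "") = some j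
        then 1 else 0 := by
  induction doc using List.reverseRecOn with
  | nil =>
    intro j hj
    simp [doc2Vec, List.getD_eq_getElem?_getD, hj]
  | append_singleton ds d ih =>
    intro j hj
    have hlen : (doc2Vec ds vocabList).length = vocabList.length := pvA_length vocabList ds
    have hstep : doc2Vec (ds ++ [d]) vocabList =
        (if d ∈ vocabList then
          match PySem.List.index? vocabList d with
          | some i => (doc2Vec ds vocabList).set i 1
          | none => doc2Vec ds vocabList
        else doc2Vec ds vocabList) := by
      unfold doc2Vec
      rw [List.foldl_append]
      simp
    rw [hstep]
    by_cases hd : d ∈ vocabList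
    · obtain ⟨i, hi⟩ := Option.isSome_iff_exists.mp ((PySem.List.index?_isSome_iff vocabList d).mpr hd)
      obtain ⟨hilt, hvi, _⟩ := PySem.List.getElem_of_index?_eq_some hi
      simp only [hd, if_true]
      rw [hi]
      rw [show ((doc2Vec ds vocabList).set i 1).getD j 0 =
            if i = j ∧ j < (doc2Vec ds vocabList).length then 1 else (doc2Vec ds vocabList).getD j 0 by
          simp [List.getD_eq_getElem?_getD, List.getElem?_set]
          split_ifs <;> simp_all]
      by_cases hij : i = j
      · subst hij
        have hv : vocabList.getD i "" = d := by
          rw [List.getD_eq_getElem?_getD, List.getElem?_eq_getElem hilt, hvi]; rfl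
        simp only [List.getD_eq_getElem?_getD, List.getElem?_eq_getElem hilt, hlen, hilt,
          Option.getD_some, if_pos, and_true]
        have hidx : List.idxOf? vocabList[i] vocabList = some i := by
          rw [hvi]; simpa using hi
        simp [hvi]
        simpa using hi
      · simp only [hij, false_and, if_false]
        rw [ih j hj]
        by_cases hvj : vocabList.getD j "" = d
        · have hsame : ¬ List.idxOf? (vocabList.getD j "") vocabList = some j := by
            rw [show List.idxOf? (vocabList.getD j "") vocabList = some i from by
              simpa using (show PySem.List.index? vocabList (vocabList.getD j "") = some i from by
                rw [hvj]; exact hi)]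
            simp [hij]
          generalize vocabList.getD j "" = v at hsame ⊢
          simp [hsame]
        · generalize vocabList.getD j "" = v at hvj ⊢
          simp [List.mem_append, hvj]
    · simp only [hd, if_false]
      rw [ih j hj]
      have hvj : vocabList.getD j "" ≠ d := by
        intro h
        apply hd
        rw [← h, List.getD_eq_getElem?_getD, List.getElem?_eq_getElem hj]
        exact List.getElem_mem hj
      generalize hg : vocabList.getD j "" = v at hvj ⊢
      simp [List.mem_append, hvj]

-- an element occurring at most once sits at index j iff it sits there; its .index is that j
theorem pvCount_index (vocabList : List String) (j : Nat) (hj : j < vocabList.length)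
    (hc : vocabList.count vocabList[j] ≤ 1) :
    PySem.List.index? vocabList vocabList[j] = some j := by
  rw [PySem.List.index?_eq_idxOf?, List.idxOf?_eq_some_iff]
  refine ⟨hj, rfl, ?_⟩
  intro k hk heq
  -- two occurrences (at k < j) would force count ≥ 2
  have hdup : List.Duplicate vocabList[j] vocabList := by
    rw [List.duplicate_iff_sublist]
    have hlt : j - (k + 1) < (vocabList.drop (k + 1)).length := by
      simp only [List.length_drop]; omega
    have h1 : List.Sublist [vocabList[j]] (vocabList.drop (k + 1)) := by
      rw [List.singleton_sublist]
      have hget : (vocabList.drop (k + 1))[j - (k + 1)]'hlt = vocabList[j] := by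
        rw [List.getElem_drop]; congr 1; omega
      rw [← hget]; exact List.getElem_mem _
    have h2 : List.Sublist [vocabList[j], vocabList[j]] (vocabList.drop k) := by
      rw [List.drop_eq_getElem_cons (by omega), heq]
      exact List.Sublist.cons₂ _ h1
    exact h2.trans (List.drop_sublist _ _)
  have := List.duplicate_iff_two_le_count.mp hdup
  omega

-- ===== VERDICT (by name: the statement is the Claim_ definition above) =====
theorem doc2Vec_spec : Claim_equal_doc2Vec := by
  intro doc vocabList _ hpre
  unfold Spec_doc2Vec doc2Vec_alt
  apply List.ext_getElem
  · rw [pvA_length]; simp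
  · intro j hja hjb
    have hj : j < vocabList.length := by rw [pvA_length] at hja; exact hja
    have h1 : (doc2Vec doc vocabList)[j]'hja = (doc2Vec doc vocabList).getD j 0 := by
      rw [List.getD_eq_getElem?_getD, List.getElem?_eq_getElem hja]; rfl
    rw [h1, pvA_get vocabList doc j hj]
    have hv : vocabList.getD j "" = vocabList[j] := by
      rw [List.getD_eq_getElem?_getD, List.getElem?_eq_getElem hj]; rfl
    by_cases hmem : vocabList[j] ∈ doc
    · rw [hv, pvCount_index vocabList j hj (hpre _ hmem)]
      simp [hmem, PySem.Set.mem_ofList]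
    · simp [hmem, PySem.Set.mem_ofList, List.getElem?_eq_getElem hj]
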